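-- pv_equiv track=rewrite | github.com/pc5401/my_BOJ | 백준/Silver/14405. 피카츄/피카츄.py | solve
-- ===== SOURCE A (Python) =====
-- def solve(pika: str) -> int:
--     N = len(pika)
--     i = 0
--     while N > i:
--         w = pika[i]
--
--         if w == 'p' and i+1 < N and pika[i+1] == 'i':
--                 i += 2
--                 continue
--         elif w == 'k' and i+1 < N and pika[i+1] == 'a':
--                 i += 2
--                 continue
--         elif w == 'c' and i+2 < N and pika[i+1] == 'h' and pika[i+2] == 'u':
--                 i += 3
--                 continue
--         else:
--             return False
--
--     return True
-- ===== SOURCE B (Python) =====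
-- def solve(pika: str) -> int:
--     # Decompose greedily from the END: the tokens pi/ka/chu have pairwise
--     # distinct last letters, so the last token (if any) is determined.
--     s = pika
--     while s:
--         if s.endswith('pi') or s.endswith('ka'):
--             s = s[:-2]
--         elif s.endswith('chu'):
--             s = s[:-3]
--         else:
--             return False
--     return True
-- ===== Notes on version B (the rewrite author's own statement) =====
-- stated objective: alternative
-- what changed: B decomposes the string greedily from the end by endswith tests and suffix stripping, instead of A's forward index scan comparing characters one by one.
import Mathlib
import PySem

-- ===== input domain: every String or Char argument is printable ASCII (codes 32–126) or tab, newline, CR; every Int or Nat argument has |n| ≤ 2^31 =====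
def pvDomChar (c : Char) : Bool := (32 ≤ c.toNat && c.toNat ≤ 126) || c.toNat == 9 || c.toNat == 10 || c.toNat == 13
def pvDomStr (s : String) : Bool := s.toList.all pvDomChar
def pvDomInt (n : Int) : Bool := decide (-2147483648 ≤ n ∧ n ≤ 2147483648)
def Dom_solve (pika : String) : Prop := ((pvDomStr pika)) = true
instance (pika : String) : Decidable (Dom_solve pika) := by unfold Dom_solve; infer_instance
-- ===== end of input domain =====

-- B re-implements A's forward token scan as a backward endswith/suffix-stripping loop (objective: alternative).


-- ===== PORT A =====
-- while N > i: read pika[i] (in range by the guard), step by 2 or 3, or return False.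
def solveLoop (cs : List Char) (i : Nat) : Bool :=
  if h : i < cs.length then
    let w := cs[i]
    if w = 'p' ∧ i + 1 < cs.length ∧ cs[i+1]? = some 'i' then
      solveLoop cs (i + 2)
    else if w = 'k' ∧ i + 1 < cs.length ∧ cs[i+1]? = some 'a' then
      solveLoop cs (i + 2)
    else if w = 'c' ∧ i + 2 < cs.length ∧ cs[i+1]? = some 'h' ∧ cs[i+2]? = some 'u' then
      solveLoop cs (i + 3)
    else
      false
  else
    true
termination_by cs.length - i

def solve (pika : String) : Bool := solveLoop pika.toList 0

-- ===== PORT B =====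
-- while s: strip a matching suffix; s[:-2] / s[:-3] are take (len-2) / take (len-3)
-- (exact by PySem.List.slice_to_neg_ofNat).
def altLoop (s : List Char) : Bool :=
  if hs : s = [] then
    true
  else if PySem.Chars.endswith s ['p','i'] ∨ PySem.Chars.endswith s ['k','a'] then
    altLoop (s.take (s.length - 2))
  else if PySem.Chars.endswith s ['c','h','u'] then
    altLoop (s.take (s.length - 3))
  else
    false
termination_by s.length
decreasing_by
  · have : 0 < s.length := List.length_pos_iff.mpr hs
    simp [List.length_take]; omega
  · have : 0 < s.length := List.length_pos_iff.mpr hs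
    simp [List.length_take]; omega

def solve_alt (pika : String) : Bool := altLoop pika.toList

-- ===== PRECONDITION & SPEC =====
def Spec_solve (pika : String) (out : Bool) : Prop := out = solve_alt pika
instance (pika : String) (out : Bool) : Decidable (Spec_solve pika out) := by unfold Spec_solve; infer_instance

-- ===== CLAIM (what is proved, stated in full; the proofs are below) =====
def Claim_equal_solve : Prop := ∀ (pika : String), Dom_solve pika → Spec_solve pika (solve pika)

-- ===== LEMMAS AND PROOFS =====

-- The language {pi,ka,chu}*, generated by prepending tokens.
inductive PikaF : List Char → Prop
  | nil : PikaF []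
  | pi {l} : PikaF l → PikaF ('p' :: 'i' :: l)
  | ka {l} : PikaF l → PikaF ('k' :: 'a' :: l)
  | chu {l} : PikaF l → PikaF ('c' :: 'h' :: 'u' :: l)

-- first-token inversion
theorem pikaF_cases {d : List Char} (h : PikaF d) :
    d = [] ∨ (∃ l, PikaF l ∧ d = 'p' :: 'i' :: l) ∨ (∃ l, PikaF l ∧ d = 'k' :: 'a' :: l) ∨
      (∃ l, PikaF l ∧ d = 'c' :: 'h' :: 'u' :: l) := by
  cases h with
  | nil => exact Or.inl rfl
  | pi h => exact Or.inr (Or.inl ⟨_, h, rfl⟩)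
  | ka h => exact Or.inr (Or.inr (Or.inl ⟨_, h, rfl⟩))
  | chu h => exact Or.inr (Or.inr (Or.inr ⟨_, h, rfl⟩))

-- last-token inversion: the tokens' last letters are pairwise distinct
theorem pikaF_last_cases {d : List Char} (h : PikaF d) :
    d = [] ∨ (∃ l, PikaF l ∧ d = l ++ ['p','i']) ∨ (∃ l, PikaF l ∧ d = l ++ ['k','a']) ∨
      (∃ l, PikaF l ∧ d = l ++ ['c','h','u']) := by
  induction h with
  | nil => exact Or.inl rfl
  | pi _ ih =>
    rcases ih with rfl | ⟨l, hl, rfl⟩ | ⟨l, hl, rfl⟩ | ⟨l, hl, rfl⟩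
    · exact Or.inr (Or.inl ⟨[], PikaF.nil, rfl⟩)
    · exact Or.inr (Or.inl ⟨_, PikaF.pi hl, rfl⟩)
    · exact Or.inr (Or.inr (Or.inl ⟨_, PikaF.pi hl, rfl⟩))
    · exact Or.inr (Or.inr (Or.inr ⟨_, PikaF.pi hl, rfl⟩))
  | ka _ ih =>
    rcases ih with rfl | ⟨l, hl, rfl⟩ | ⟨l, hl, rfl⟩ | ⟨l, hl, rfl⟩
    · exact Or.inr (Or.inr (Or.inl ⟨[], PikaF.nil, rfl⟩))
    · exact Or.inr (Or.inl ⟨_, PikaF.ka hl, rfl⟩)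
    · exact Or.inr (Or.inr (Or.inl ⟨_, PikaF.ka hl, rfl⟩))
    · exact Or.inr (Or.inr (Or.inr ⟨_, PikaF.ka hl, rfl⟩))
  | chu _ ih =>
    rcases ih with rfl | ⟨l, hl, rfl⟩ | ⟨l, hl, rfl⟩ | ⟨l, hl, rfl⟩
    · exact Or.inr (Or.inr (Or.inr ⟨[], PikaF.nil, rfl⟩))
    · exact Or.inr (Or.inl ⟨_, PikaF.chu hl, rfl⟩)
    · exact Or.inr (Or.inr (Or.inl ⟨_, PikaF.chu hl, rfl⟩))
    · exact Or.inr (Or.inr (Or.inr ⟨_, PikaF.chu hl, rfl⟩))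

-- drop-index bookkeeping
theorem drop_cons_facts {cs : List Char} {i : Nat} {x : Char} {t : List Char}
    (h : cs.drop i = x :: t) : cs[i]? = some x ∧ cs.drop (i+1) = t := by
  have h0 : (cs.drop i)[0]? = some x := by rw [h]; rfl
  rw [List.getElem?_drop] at h0
  constructor
  · simpa using h0
  · have h1 : (cs.drop i).drop 1 = t := by rw [h]; rfl
    rwa [List.drop_drop] at h1

-- A's loop accepts iff the remaining suffix of the word is in the language.
theorem solveLoop_sound (cs : List Char) (i : Nat)
    (h : solveLoop cs i = true) : PikaF (cs.drop i) := by
  fun_induction solveLoop cs i with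
  | case1 i hlt w c ih =>
    obtain ⟨hp, hlen, hi⟩ := c
    have hdrop : cs.drop i = 'p' :: 'i' :: cs.drop (i+2) := by
      rw [List.drop_eq_getElem_cons hlt, List.drop_eq_getElem_cons hlen]
      have h2 : cs[i+1] = 'i' := by
        rw [List.getElem?_eq_getElem hlen] at hi; exact Option.some_injective _ hi
      simp only [show cs[i] = 'p' from hp, h2]
    rw [hdrop]; exact PikaF.pi (ih h)
  | case2 i hlt w nc c ih =>
    obtain ⟨hk, hlen, ha⟩ := c
    have hdrop : cs.drop i = 'k' :: 'a' :: cs.drop (i+2) := by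
      rw [List.drop_eq_getElem_cons hlt, List.drop_eq_getElem_cons hlen]
      have h2 : cs[i+1] = 'a' := by
        rw [List.getElem?_eq_getElem hlen] at ha; exact Option.some_injective _ ha
      simp only [show cs[i] = 'k' from hk, h2]
    rw [hdrop]; exact PikaF.ka (ih h)
  | case3 i hlt w nc1 nc2 c ih =>
    obtain ⟨hc, hlen, hh, hu⟩ := c
    have hlen1 : i + 1 < cs.length := by omega
    have hdrop : cs.drop i = 'c' :: 'h' :: 'u' :: cs.drop (i+3) := by
      rw [List.drop_eq_getElem_cons hlt, List.drop_eq_getElem_cons hlen1,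
          List.drop_eq_getElem_cons hlen]
      have h1 : cs[i+1] = 'h' := by
        rw [List.getElem?_eq_getElem hlen1] at hh; exact Option.some_injective _ hh
      have h2 : cs[i+2] = 'u' := by
        rw [List.getElem?_eq_getElem hlen] at hu; exact Option.some_injective _ hu
      simp only [show cs[i] = 'c' from hc, h1, h2]
    rw [hdrop]; exact PikaF.chu (ih h)
  | case4 i hlt w nc1 nc2 nc3 => simp at h
  | case5 i hge =>
    rw [List.drop_eq_nil_of_le (by omega)]; exact PikaF.nil

theorem solveLoop_complete (cs : List Char) (i : Nat)
    (h : PikaF (cs.drop i)) : solveLoop cs i = true := by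
  fun_induction solveLoop cs i with
  | case1 i hlt w c ih =>
    apply ih
    obtain ⟨hp, hlen, hi⟩ := c
    rcases pikaF_cases h with hd | ⟨l, hl, hd⟩ | ⟨l, hl, hd⟩ | ⟨l, hl, hd⟩
    · exact absurd (congrArg List.length hd) (by simp; omega)
    · have f1 := drop_cons_facts hd
      have f2 := drop_cons_facts f1.2
      rw [f2.2]; exact hl
    · have f1 := (drop_cons_facts hd).1
      rw [List.getElem?_eq_getElem hlt, show cs[i] = 'p' from hp] at f1; simp at f1
    · have f1 := (drop_cons_facts hd).1
      rw [List.getElem?_eq_getElem hlt, show cs[i] = 'p' from hp] at f1; simp at f1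
  | case2 i hlt w nc c ih =>
    apply ih
    obtain ⟨hk, hlen, ha⟩ := c
    rcases pikaF_cases h with hd | ⟨l, hl, hd⟩ | ⟨l, hl, hd⟩ | ⟨l, hl, hd⟩
    · exact absurd (congrArg List.length hd) (by simp; omega)
    · have f1 := (drop_cons_facts hd).1
      rw [List.getElem?_eq_getElem hlt, show cs[i] = 'k' from hk] at f1; simp at f1
    · have f1 := drop_cons_facts hd
      have f2 := drop_cons_facts f1.2
      rw [f2.2]; exact hl
    · have f1 := (drop_cons_facts hd).1
      rw [List.getElem?_eq_getElem hlt, show cs[i] = 'k' from hk] at f1; simp at f1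
  | case3 i hlt w nc1 nc2 c ih =>
    apply ih
    obtain ⟨hc, hlen, hh, hu⟩ := c
    rcases pikaF_cases h with hd | ⟨l, hl, hd⟩ | ⟨l, hl, hd⟩ | ⟨l, hl, hd⟩
    · exact absurd (congrArg List.length hd) (by simp; omega)
    · have f1 := (drop_cons_facts hd).1
      rw [List.getElem?_eq_getElem hlt, show cs[i] = 'c' from hc] at f1; simp at f1
    · have f1 := (drop_cons_facts hd).1
      rw [List.getElem?_eq_getElem hlt, show cs[i] = 'c' from hc] at f1; simp at f1
    · have f1 := drop_cons_facts hd
      have f2 := drop_cons_facts f1.2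
      have f3 := drop_cons_facts f2.2
      rw [f3.2]; exact hl
  | case4 i hlt w nc1 nc2 nc3 =>
    exfalso
    rcases pikaF_cases h with hd | ⟨l, hl, hd⟩ | ⟨l, hl, hd⟩ | ⟨l, hl, hd⟩
    · exact absurd (congrArg List.length hd) (by simp; omega)
    · have f1 := drop_cons_facts hd
      have f2 := drop_cons_facts f1.2
      have hx : cs[i] = 'p' := by
        rw [List.getElem?_eq_getElem hlt] at f1; exact Option.some_injective _ f1.1
      exact nc1 ⟨hx, (List.getElem?_eq_some_iff.mp f2.1).1, f2.1⟩
    · have f1 := drop_cons_facts hd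
      have f2 := drop_cons_facts f1.2
      have hx : cs[i] = 'k' := by
        rw [List.getElem?_eq_getElem hlt] at f1; exact Option.some_injective _ f1.1
      exact nc2 ⟨hx, (List.getElem?_eq_some_iff.mp f2.1).1, f2.1⟩
    · have f1 := drop_cons_facts hd
      have f2 := drop_cons_facts f1.2
      have f3 := drop_cons_facts f2.2
      have hx : cs[i] = 'c' := by
        rw [List.getElem?_eq_getElem hlt] at f1; exact Option.some_injective _ f1.1
      exact nc3 ⟨hx, (List.getElem?_eq_some_iff.mp f3.1).1, f2.1, f3.1⟩
  | case5 i hge => rfl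

-- B-side: suffix facts
theorem suffix_strip {s p : List Char} (h : p <:+ s) :
    s.take (s.length - p.length) ++ p = s := by
  obtain ⟨t, rfl⟩ := h
  simp [List.take_left']

theorem token_take {l p : List Char} :
    (l ++ p).take ((l ++ p).length - p.length) = l := by
  have : (l ++ p).length - p.length = l.length := by simp
  rw [this, List.take_left]

theorem getLast_of_suffix {s p : List Char} (hp : p ≠ []) (h : p <:+ s) :
    s.getLast? = p.getLast? := by
  obtain ⟨t, rfl⟩ := h
  exact List.getLast?_append_of_ne_nil _ hp

-- PikaF is closed under appending a token at the end.
theorem pikaF_append_pi {l : List Char} (h : PikaF l) : PikaF (l ++ ['p','i']) := by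
  induction h with
  | nil => exact PikaF.pi PikaF.nil
  | pi _ ih => exact PikaF.pi ih
  | ka _ ih => exact PikaF.ka ih
  | chu _ ih => exact PikaF.chu ih

theorem pikaF_append_ka {l : List Char} (h : PikaF l) : PikaF (l ++ ['k','a']) := by
  induction h with
  | nil => exact PikaF.ka PikaF.nil
  | pi _ ih => exact PikaF.pi ih
  | ka _ ih => exact PikaF.ka ih
  | chu _ ih => exact PikaF.chu ih

theorem pikaF_append_chu {l : List Char} (h : PikaF l) : PikaF (l ++ ['c','h','u']) := by
  induction h with
  | nil => exact PikaF.chu PikaF.nil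
  | pi _ ih => exact PikaF.pi ih
  | ka _ ih => exact PikaF.ka ih
  | chu _ ih => exact PikaF.chu ih

theorem altLoop_sound (s : List Char) (h : altLoop s = true) : PikaF s := by
  fun_induction altLoop s with
  | case1 => exact PikaF.nil
  | case2 s hs c ih =>
    have hp := ih h
    rcases c with hc | hc
    · have hsuf : ['p','i'] <:+ s := (PySem.Chars.endswith_iff _ _).mp hc
      have heq := suffix_strip hsuf
      rw [show s = s.take (s.length - 2) ++ ['p','i'] from heq.symm]
      exact pikaF_append_pi hp
    · have hsuf : ['k','a'] <:+ s := (PySem.Chars.endswith_iff _ _).mp hc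
      have heq := suffix_strip hsuf
      rw [show s = s.take (s.length - 2) ++ ['k','a'] from heq.symm]
      exact pikaF_append_ka hp
  | case3 s hs nc c ih =>
    have hp := ih h
    have hsuf : ['c','h','u'] <:+ s := (PySem.Chars.endswith_iff _ _).mp c
    have heq := suffix_strip hsuf
    rw [show s = s.take (s.length - 3) ++ ['c','h','u'] from heq.symm]
    exact pikaF_append_chu hp
  | case4 s hs nc1 nc2 => simp at h

theorem altLoop_complete (s : List Char) (h : PikaF s) : altLoop s = true := by
  fun_induction altLoop s with
  | case1 => rfl
  | case2 s hs c ih =>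
    apply ih
    rcases pikaF_last_cases h with rfl | ⟨l, hl, rfl⟩ | ⟨l, hl, rfl⟩ | ⟨l, hl, rfl⟩
    · exact absurd rfl hs
    · rw [show (l ++ ['p','i']).length - 2 = (l ++ ['p','i']).length - (['p','i'] : List Char).length from rfl, token_take]; exact hl
    · rw [show (l ++ ['k','a']).length - 2 = (l ++ ['k','a']).length - (['k','a'] : List Char).length from rfl, token_take]; exact hl
    · -- word ends in 'u': neither endswith 'pi' nor 'ka' can hold
      exfalso
      have hu : (l ++ ['c','h','u']).getLast? = some 'u' :=
        List.getLast?_append_of_ne_nil _ (by simp)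
      rcases c with hc | hc
      · have := getLast_of_suffix (by simp) ((PySem.Chars.endswith_iff _ _).mp hc)
        rw [hu] at this; simp at this
      · have := getLast_of_suffix (by simp) ((PySem.Chars.endswith_iff _ _).mp hc)
        rw [hu] at this; simp at this
  | case3 s hs nc c ih =>
    apply ih
    rcases pikaF_last_cases h with rfl | ⟨l, hl, rfl⟩ | ⟨l, hl, rfl⟩ | ⟨l, hl, rfl⟩
    · exact absurd rfl hs
    · exact absurd (Or.inl ((PySem.Chars.endswith_iff _ _).mpr ⟨l, rfl⟩)) nc
    · exact absurd (Or.inr ((PySem.Chars.endswith_iff _ _).mpr ⟨l, rfl⟩)) nc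
    · rw [show (l ++ ['c','h','u']).length - 3 = (l ++ ['c','h','u']).length - (['c','h','u'] : List Char).length from rfl, token_take]; exact hl
  | case4 s hs nc1 nc2 =>
    exfalso
    rcases pikaF_last_cases h with rfl | ⟨l, hl, rfl⟩ | ⟨l, hl, rfl⟩ | ⟨l, hl, rfl⟩
    · exact absurd rfl hs
    · exact nc1 (Or.inl ((PySem.Chars.endswith_iff _ _).mpr ⟨l, rfl⟩))
    · exact nc1 (Or.inr ((PySem.Chars.endswith_iff _ _).mpr ⟨l, rfl⟩))
    · exact nc2 ((PySem.Chars.endswith_iff _ _).mpr ⟨l, rfl⟩)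

-- ===== VERDICT (by name: the statement is the Claim_ definition above) =====
theorem solve_spec : Claim_equal_solve := by
  intro pika _
  unfold Spec_solve
  have h1 : solve pika = true ↔ PikaF pika.toList := by
    constructor
    · intro h; simpa using solveLoop_sound pika.toList 0 h
    · intro h; exact solveLoop_complete pika.toList 0 (by simpa using h)
  have h2 : solve_alt pika = true ↔ PikaF pika.toList :=
    ⟨altLoop_sound pika.toList, altLoop_complete pika.toList⟩
  exact Bool.eq_iff_iff.mpr (h1.trans h2.symm)
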